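-- pv_equiv track=rewrite | github.com/bobik1234/bets | tournament/utils.py | _set_place
-- ===== SOURCE A (Python) =====
-- def _set_place(sorted_rounds_results):
--     """
--     Ustawia miejsce na posortowanych slownikach - ktore miejsce ma uzytkownik w danej rundzie
--
--     Wejscie:
--     {tournament : {'round' : [(user, score), (user, score)... ]...
--                                'summary' : [(user, score), (user, score)... ]}
--
--     Wyjscie:
--     {tournament : {'round' : [(place,user, score), (place,user, score)... ]...
--                                'summary' : [(place,"-", user, score), (place, "-", user, score)... ]}
--
--     :param sorted_rounds_results:
--     :return:
--     """
--
--     sorted_rounds_results_with_place = {}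
--
--     for tournament_name, tournament_data in sorted_rounds_results.items():
--
--         rounds_dict = {}
--
--         for round_name, round_data in tournament_data.items():
--
--             list = []
--             previous_score = None
--             previous_place = None
--
--             for i, user_and_score in enumerate(round_data, start=1):
--                 user, score = user_and_score
--
--                 if score == previous_score:
--                     # list.append(("-", user, score))
--                     list.append((previous_place, "-", user, score))
--                 else:
--                     list.append((i, "-", user, score))
--                     previous_place = i
--                     previous_score = score
--
--             rounds_dict.update({round_name: list})
--
--         sorted_rounds_results_with_place.update({tournament_name: rounds_dict})
--
--     return sorted_rounds_results_with_place
-- ===== SOURCE B (Python) =====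
-- import bisect
--
--
-- def _set_place(sorted_rounds_results):
--     def rank(round_data):
--         scores = [score for _user, score in round_data]
--         # indices where a new run of scores begins
--         starts = [i for i in range(len(scores)) if i == 0 or scores[i] != scores[i - 1]]
--         # each element's place = 1 + start index of its run, found by binary search
--         return [(starts[bisect.bisect_right(starts, i) - 1] + 1, "-", user, score)
--                 for i, (user, score) in enumerate(round_data)]
--
--     return {tournament: {round_name: rank(round_data)
--                          for round_name, round_data in tournament_data.items()}
--             for tournament, tournament_data in sorted_rounds_results.items()}
-- ===== Notes on version B (the rewrite author's own statement) =====
-- stated objective: alternative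
-- what changed: Replaces A's stateful previous_score/previous_place single pass with a staged algorithm: first compute the list of run-start indices from adjacent score inequality, then assign each element's place by binary search (bisect_right) for its run start; the outer dict levels become comprehensions.
import Mathlib
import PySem

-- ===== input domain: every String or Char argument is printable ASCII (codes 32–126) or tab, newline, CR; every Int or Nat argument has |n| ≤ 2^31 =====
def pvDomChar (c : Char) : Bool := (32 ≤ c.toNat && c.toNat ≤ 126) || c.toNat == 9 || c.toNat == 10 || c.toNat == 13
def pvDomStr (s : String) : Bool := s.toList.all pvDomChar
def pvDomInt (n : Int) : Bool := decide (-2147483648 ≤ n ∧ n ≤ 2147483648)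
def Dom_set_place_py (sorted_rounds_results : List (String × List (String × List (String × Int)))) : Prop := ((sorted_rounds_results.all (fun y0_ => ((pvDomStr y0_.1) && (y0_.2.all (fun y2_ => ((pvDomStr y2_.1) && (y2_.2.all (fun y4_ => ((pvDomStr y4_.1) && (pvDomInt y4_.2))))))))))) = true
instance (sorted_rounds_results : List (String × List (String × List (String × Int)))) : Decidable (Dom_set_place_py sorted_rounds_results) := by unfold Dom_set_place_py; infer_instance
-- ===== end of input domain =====

-- ===== PORT A =====
-- B replaces A's stateful previous_score/previous_place single pass with a staged
-- algorithm: run-start indices first, then a binary search per element; objective: alternative.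

-- inner loop of A: enumerate(round_data, start=1) with previous_place/previous_score state.
-- `prevPlace.getD 0` is only evaluated when prevScore = some _, and in A the two variables
-- are always assigned together, so the default 0 is unreachable.
def setPlaceALoop (i : Int) (prevPlace prevScore : Option Int) :
    List (String × Int) → List (Int × String × String × Int)
  | [] => []
  | (user, score) :: rest =>
    if some score == prevScore then
      (prevPlace.getD 0, "-", user, score) :: setPlaceALoop (i + 1) prevPlace prevScore rest
    else
      (i, "-", user, score) :: setPlaceALoop (i + 1) (some i) (some score) rest

def set_place_py (sorted_rounds_results : List (String × List (String × List (String × Int)))) : List (String × List (String × List (Int × String × String × Int))) :=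
  sorted_rounds_results.foldl
    (fun acc td =>
      acc ++ [(td.1,
        td.2.foldl (fun rd r => rd ++ [(r.1, setPlaceALoop 1 none none r.2)]) [])])
    []

-- ===== PORT B =====
-- rank(round_data): scores, then the run-start indices, then place by bisect_right.
-- starts[bisect_right(starts, i) - 1]: the index is ≥ 0 whenever rank is applied
-- (starts contains 0), so pyGetD at a nonnegative in-range index is exact here.
def setPlaceRankB (round_data : List (String × Int)) : List (Int × String × String × Int) :=
  let scores := round_data.map (fun us => us.2)
  let starts := (PySem.List.pyRange 0 scores.length 1).filter
      (fun i => i == 0 || !(PySem.List.pyGetD scores i 0 == PySem.List.pyGetD scores (i - 1) 0))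
  (PySem.List.enumerate round_data 0).map
      (fun p => (PySem.List.pyGetD starts (((PySem.List.bisectRight starts p.1 : Nat) : Int) - 1) 0 + 1,
                 "-", p.2.1, p.2.2))

def set_place_py_alt (sorted_rounds_results : List (String × List (String × List (String × Int)))) : List (String × List (String × List (Int × String × String × Int))) :=
  sorted_rounds_results.map (fun td =>
    (td.1, td.2.map (fun r => (r.1, setPlaceRankB r.2))))

-- ===== PRECONDITION & SPEC =====
def Spec_set_place_py (sorted_rounds_results : List (String × List (String × List (String × Int)))) (out : List (String × List (String × List (Int × String × String × Int)))) : Prop := out = set_place_py_alt sorted_rounds_results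
instance (sorted_rounds_results : List (String × List (String × List (String × Int)))) (out : List (String × List (String × List (Int × String × String × Int)))) : Decidable (Spec_set_place_py sorted_rounds_results out) := by
  unfold Spec_set_place_py
  letI h1 : DecidableEq (List (Int × String × String × Int)) := inferInstance
  letI h2 : DecidableEq (List (String × List (Int × String × String × Int))) := instDecidableEqList
  infer_instance

-- ===== CLAIM (what is proved, stated in full; the proofs are below) =====
def Claim_equal_set_place_py : Prop := ∀ (sorted_rounds_results : List (String × List (String × List (String × Int)))), Dom_set_place_py sorted_rounds_results → Spec_set_place_py sorted_rounds_results (set_place_py sorted_rounds_results)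

-- ===== LEMMAS AND PROOFS =====

-- the common specification: each element's place is 1 + the start index of its run,
-- where mSpec scores i = the largest j ≤ i with j = 0 or scores[j] ≠ scores[j-1].
def mSpec (scores : List Int) : Nat → Nat
  | 0 => 0
  | i + 1 => if scores.getD (i + 1) 0 == scores.getD i 0 then mSpec scores i else i + 1

def specMap (rd : List (String × Int)) : List (Int × String × String × Int) :=
  (rd.zipIdx 0).map (fun q => ((mSpec (rd.map (fun us => us.2)) q.2 : Int) + 1, "-", q.1.1, q.1.2))

-- the Bool tested by B's filter, restricted to Nat indices
def isStartB (scores : List Int) (j : Nat) : Bool :=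
  j == 0 || !(scores.getD j 0 == scores.getD (j - 1) 0)

theorem mSpec_le (scores : List Int) (i : Nat) : mSpec scores i ≤ i := by
  induction i with
  | zero => simp [mSpec]
  | succ i ih => simp only [mSpec]; split <;> omega

theorem mSpec_isStart (scores : List Int) (i : Nat) : isStartB scores (mSpec scores i) = true := by
  induction i with
  | zero => simp [mSpec, isStartB]
  | succ i ih =>
    simp only [mSpec]
    split
    · exact ih
    · simp_all [isStartB]

theorem mSpec_max (scores : List Int) (i j : Nat) (hji : j ≤ i)
    (hj : isStartB scores j = true) : j ≤ mSpec scores i := by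
  induction i with
  | zero => omega
  | succ i ih =>
    simp only [mSpec]
    split
    · rename_i heq
      rcases Nat.lt_or_ge j (i + 1) with h | h
      · exact ih (by omega)
      · exfalso
        have : j = i + 1 := by omega
        subst this
        simp_all [isStartB]
    · omega

-- A's inner loop, with the state it carries after k processed elements
def ppOf (scores : List Int) : Nat → Option Int
  | 0 => none
  | k + 1 => some ((mSpec scores k : Int) + 1)

def psOf (scores : List Int) : Nat → Option Int
  | 0 => none
  | k + 1 => some (scores.getD k 0)

-- invariant: after k elements, A's loop state is (ppOf k, psOf k) and the rest of
-- its output is the spec map over the remaining suffix with absolute indices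
theorem Aloop_spec (rd : List (String × Int)) :
    ∀ (l : List (String × Int)) (k : Nat), rd.drop k = l →
      setPlaceALoop ((k : Int) + 1) (ppOf (rd.map (fun us => us.2)) k)
          (psOf (rd.map (fun us => us.2)) k) l
        = (l.zipIdx k).map
            (fun q => ((mSpec (rd.map (fun us => us.2)) q.2 : Int) + 1, "-", q.1.1, q.1.2)) := by
  intro l
  induction l with
  | nil => intro k _; simp [setPlaceALoop]
  | cons x l' ih =>
    intro k hdrop
    obtain ⟨u, s⟩ := x
    have hk : k < rd.length := by
      by_contra h
      rw [List.drop_eq_nil_of_le (by omega)] at hdrop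
      exact (List.cons_ne_nil _ _) hdrop.symm
    have hget : rd[k] = (u, s) := by
      have h0 : (rd.drop k)[0]? = rd[k + 0]? := List.getElem?_drop ..
      rw [hdrop] at h0
      simp only [List.getElem?_cons_zero, Nat.add_zero, List.getElem?_eq_getElem hk] at h0
      exact (Option.some.inj h0).symm
    have hscore : (rd.map (fun us => us.2)).getD k 0 = s := by
      rw [List.getD_eq_getElem?_getD]
      simp [List.getElem?_eq_getElem hk, hget]
    have htail : rd.drop (k + 1) = l' := by
      rw [← List.tail_drop, hdrop]; rfl
    have ihk := ih (k + 1) htail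
    cases k with
    | zero =>
      simp only [ppOf, psOf] at ihk ⊢
      rw [hscore] at ihk
      simp only [mSpec] at ihk ⊢
      simp only [setPlaceALoop, List.zipIdx_cons, List.map_cons]
      norm_num
      norm_num at ihk
      exact ihk
    | succ k' =>
      simp only [ppOf, psOf] at ihk ⊢
      by_cases hc : s = (rd.map (fun us => us.2)).getD k' 0
      · have hm : mSpec (rd.map (fun us => us.2)) (k' + 1)
            = mSpec (rd.map (fun us => us.2)) k' := by
          simp only [mSpec, hscore, hc]
          simp
        simp only [setPlaceALoop, hc, beq_self_eq_true, if_true,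
          List.zipIdx_cons, List.map_cons, hm]
        simp only [Option.getD_some]
        rw [hscore, hc, hm] at ihk
        rw [show ((k' + 1 : Nat) : Int) + 1 + 1 = ((k' + 1 + 1 : Nat) : Int) + 1 by push_cast; ring]
        rw [ihk]
      · have hm : mSpec (rd.map (fun us => us.2)) (k' + 1) = k' + 1 := by
          have hfalse : (s == (rd.map (fun us => us.2)).getD k' 0) = false := by
            simpa using hc
          simp only [mSpec, hscore, hfalse]
          simp
        simp only [setPlaceALoop]
        rw [if_neg (by simp only [beq_iff_eq, Option.some.injEq]; exact hc)]
        simp only [List.zipIdx_cons, List.map_cons, hm]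
        rw [hscore, hm] at ihk
        rw [show ((k' + 1 : Nat) : Int) + 1 + 1 = ((k' + 1 + 1 : Nat) : Int) + 1 by push_cast; ring]
        rw [ihk]

theorem Aloop_eq_specMap (rd : List (String × Int)) :
    setPlaceALoop 1 none none rd = specMap rd := by
  have h := Aloop_spec rd rd 0 (by simp)
  simpa [specMap, ppOf, psOf] using h

-- B's run-start filter over pyRange is the Nat-level filter by isStartB, cast to Int
theorem starts_eq (scores : List Int) :
    (PySem.List.pyRange 0 scores.length 1).filter
        (fun i => i == 0 || !(PySem.List.pyGetD scores i 0 == PySem.List.pyGetD scores (i - 1) 0))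
      = ((List.range scores.length).filter (isStartB scores)).map (fun j : Nat => (j : Int)) := by
  rw [PySem.List.pyRange_zero_nat, List.filter_map]
  refine congrArg (List.map _) (List.filter_congr ?_)
  intro j _
  cases j with
  | zero => simp [isStartB]
  | succ j' =>
    simp only [Function.comp]
    rw [show ((j' + 1 : Nat) : Int) - 1 = ((j' : Nat) : Int) by push_cast; ring,
      PySem.List.pyGetD_natCast, PySem.List.pyGetD_natCast]
    simp [isStartB]
    intro h
    exact absurd h (by omega)

theorem stN_sorted (scores : List Int) :
    ((List.range scores.length).filter (isStartB scores)).Pairwise (· < ·) :=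
  List.Pairwise.filter _ List.pairwise_lt_range

theorem mem_stN (scores : List Int) (j : Nat) :
    j ∈ (List.range scores.length).filter (isStartB scores) ↔
      j < scores.length ∧ isStartB scores j = true := by
  simp [List.mem_filter, List.mem_range]

-- the heart of B: binary search in the run-start list finds exactly mSpec
theorem bisect_place (scores : List Int) (k : Nat) (hk : k < scores.length) :
    PySem.List.pyGetD
        (((List.range scores.length).filter (isStartB scores)).map (fun j : Nat => (j : Int)))
        (((PySem.List.bisectRight
            (((List.range scores.length).filter (isStartB scores)).map (fun j : Nat => (j : Int)))
            (k : Int) : Nat) : Int) - 1) 0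
      = (mSpec scores k : Int) := by
  set stN := (List.range scores.length).filter (isStartB scores) with hstN
  set starts := stN.map (fun j : Nat => (j : Int)) with hstarts
  have hsortN : stN.Pairwise (· < ·) := by rw [hstN]; exact stN_sorted scores
  have hsorted : starts.Pairwise (· ≤ ·) := by
    rw [hstarts, List.pairwise_map]
    exact hsortN.imp (fun h => by omega)
  obtain ⟨hKle, hlt, hge⟩ := PySem.List.bisectRight_spec starts (k : Int) hsorted
  set K := PySem.List.bisectRight starts (k : Int) with hK
  have h0mem : 0 ∈ stN := (mem_stN scores 0).mpr ⟨by omega, by simp [isStartB]⟩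
  have hne : 0 < stN.length := List.length_pos_of_mem h0mem
  have hlenst : starts.length = stN.length := List.length_map ..
  have hpos : 0 < starts.length := by rw [hlenst]; exact hne
  have hKle' : K ≤ stN.length := by rw [← hlenst]; exact hKle
  have hstN0 : stN[0]'hne = 0 := by
    obtain ⟨i, hi, hieq⟩ := List.mem_iff_getElem.mp h0mem
    cases i with
    | zero => exact hieq
    | succ i' =>
      have := (List.pairwise_iff_getElem.mp hsortN) 0 (i' + 1) hne hi (by omega)
      rw [hieq] at this
      omega
  have hst0 : starts[0]'hpos = 0 := by
    have h := List.getElem_map (f := fun j : Nat => (j : Int)) (l := stN)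
      (i := 0) (h := hpos)
    rw [h, hstN0]
    simp
  have hK1 : 1 ≤ K := by
    by_contra h
    have h2 := hge 0 hpos (by omega)
    rw [hst0] at h2
    omega
  have hidx : K - 1 < starts.length := by rw [hlenst]; omega
  have hidxN : K - 1 < stN.length := by omega
  have h1 : starts[K - 1]'hidx ≤ (k : Int) := hlt (K - 1) hidx (by omega)
  have hcast : starts[K - 1]'hidx = ((stN[K - 1]'hidxN : Nat) : Int) :=
    List.getElem_map (f := fun j : Nat => (j : Int)) (l := stN) (i := K - 1) (h := hidx)
  have hmem : stN[K - 1]'hidxN ∈ stN := List.getElem_mem hidxN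
  have hprops := (mem_stN scores _).mp hmem
  have hlek : stN[K - 1]'hidxN ≤ k := by
    rw [hcast] at h1
    exact_mod_cast h1
  have hleM : stN[K - 1]'hidxN ≤ mSpec scores k := mSpec_max scores k _ hlek hprops.2
  have hMmem : mSpec scores k ∈ stN := (mem_stN scores _).mpr
    ⟨by have := mSpec_le scores k; omega, mSpec_isStart scores k⟩
  obtain ⟨jM, hjM, hMeq⟩ := List.mem_iff_getElem.mp hMmem
  have hjMs : jM < starts.length := by rw [hlenst]; omega
  have hjMK : jM < K := by
    by_contra h
    have h2 := hge jM hjMs (by omega)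
    have h3 : starts[jM]'hjMs = ((stN[jM]'hjM : Nat) : Int) :=
      List.getElem_map (f := fun j : Nat => (j : Int)) (l := stN) (i := jM) (h := hjMs)
    rw [h3, hMeq] at h2
    have h4 := mSpec_le scores k
    omega
  have hfin : stN[K - 1]'hidxN = mSpec scores k := by
    rcases Nat.lt_or_ge jM (K - 1) with h | h
    · have h5 := (List.pairwise_iff_getElem.mp hsortN) jM (K - 1) hjM hidxN h
      rw [hMeq] at h5
      omega
    · have hje : jM = K - 1 := by omega
      subst hje
      exact hMeq
  have hKcast : ((K : Nat) : Int) - 1 = ((K - 1 : Nat) : Int) := by omega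
  rw [hKcast, PySem.List.pyGetD_natCast, List.getD_eq_getElem _ _ hidx, hcast, hfin]

-- B's rank equals the spec map
theorem rankB_eq_specMap (rd : List (String × Int)) :
    setPlaceRankB rd = specMap rd := by
  simp only [setPlaceRankB, specMap]
  rw [starts_eq, PySem.List.enumerate_eq_zipIdx_map, List.map_map]
  apply List.map_congr_left
  intro q hq
  obtain ⟨x, i⟩ := q
  obtain ⟨-, hi, -⟩ := List.mem_zipIdx hq
  have hi' : i < (rd.map (fun us => us.2)).length := by
    rw [List.length_map]; omega
  have hb := bisect_place (rd.map (fun us => us.2)) i hi'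
  simp only [Function.comp, zero_add]
  rw [hb]

-- A's inner foldl-append = B's inner map
theorem setPlace_inner_eq (l : List (String × List (String × Int)))
    (acc : List (String × List (Int × String × String × Int))) :
    l.foldl (fun rd r => rd ++ [(r.1, setPlaceALoop 1 none none r.2)]) acc
      = acc ++ l.map (fun r => (r.1, setPlaceRankB r.2)) := by
  induction l generalizing acc with
  | nil => simp
  | cons x xs ih =>
    rw [List.foldl_cons, ih]
    simp [Aloop_eq_specMap, rankB_eq_specMap]

-- A's outer foldl-append = B's outer map
theorem setPlace_outer_eq (l : List (String × List (String × List (String × Int))))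
    (acc : List (String × List (String × List (Int × String × String × Int)))) :
    l.foldl (fun a td => a ++ [(td.1,
        td.2.foldl (fun rd r => rd ++ [(r.1, setPlaceALoop 1 none none r.2)]) [])]) acc
      = acc ++ l.map (fun td =>
          (td.1, td.2.map (fun r => (r.1, setPlaceRankB r.2)))) := by
  induction l generalizing acc with
  | nil => simp
  | cons x xs ih => rw [List.foldl_cons, ih, setPlace_inner_eq]; simp

-- ===== VERDICT (by name: the statement is the Claim_ definition above) =====
theorem set_place_py_spec : Claim_equal_set_place_py := by
  intro inp _
  show set_place_py inp = set_place_py_alt inp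
  unfold set_place_py set_place_py_alt
  rw [setPlace_outer_eq]
  simp
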